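-- pv_equiv track=rewrite | github.com/DevNoteKeeper/Advent-of-Code-2025 | day_6.py | get_problem_column
-- ===== SOURCE A (Python) =====
-- def get_problem_column(lines):
--     width = max(len(line) for line in lines)
--     def is_empty_col(c):
--         return all(c >= len(line) or line[c] == ' ' for line in lines)
--
--     problems = []
--     start = None
--     for c in range(width):
--         if not is_empty_col(c):
--             if start is None:
--                 start = c
--         else:
--             if start is not None:
--                 problems.append((start, c))
--                 start = None
--     if start is not None:
--         problems.append((start, width))
--     return problems
-- ===== SOURCE B (Python) =====
-- def _merge(occ):
--     # fold the strictly increasing occupied-column list from the right,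
--     # merging each column into the runs built so far
--     runs = []
--     for c in reversed(occ):
--         if runs and runs[0][0] == c + 1:
--             runs[0] = (c, runs[0][1])
--         else:
--             runs.insert(0, (c, c + 1))
--     return runs
--
-- def get_problem_column(lines):
--     occupied = sorted({c for line in lines
--                          for c, ch in enumerate(line) if ch != ' '})
--     return _merge(occupied)
-- ===== Notes on version B (the rewrite author's own statement) =====
-- stated objective: alternative
-- what changed: B never probes columns: it collects the set of occupied column indices by a single row-major scan of the characters, sorts it, and recursively merges adjacent indices into maximal intervals from the right, so A's width computation, per-column all()-scan and start=None state machine all disappear.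
import Mathlib
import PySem

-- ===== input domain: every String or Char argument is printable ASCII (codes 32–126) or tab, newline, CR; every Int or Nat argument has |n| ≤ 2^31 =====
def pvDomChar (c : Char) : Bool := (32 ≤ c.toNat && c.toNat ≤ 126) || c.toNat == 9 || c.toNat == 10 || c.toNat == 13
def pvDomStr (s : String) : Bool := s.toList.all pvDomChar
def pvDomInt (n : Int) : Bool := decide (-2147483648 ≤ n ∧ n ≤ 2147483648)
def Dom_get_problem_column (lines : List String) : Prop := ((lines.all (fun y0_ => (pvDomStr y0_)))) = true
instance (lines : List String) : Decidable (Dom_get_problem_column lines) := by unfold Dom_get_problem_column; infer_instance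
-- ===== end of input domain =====

-- B abandons A's per-column probing: a row-major scan collects the set of occupied column
-- indices, which is sorted and merged right-to-left into maximal intervals (alternative
-- algorithm over a different data structure, similar cost).

-- ===== PORT A =====
def get_problem_column (lines : List String) : List (Int × Int) :=
  match PySem.List.max? (lines.map (fun line => PySem.Str.len line)) (fun x => x) with
  | none => []   -- max() over empty: Python raises ValueError; excluded by Pre_
  | some width =>
    let isEmptyCol : Int → Bool := fun c =>
      lines.all (fun line => decide (c ≥ PySem.Str.len line) || (PySem.Str.pyGet? line c == some ' '))
    let st := (PySem.List.pyRange 0 width 1).foldl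
      (fun (st : List (Int × Int) × Option Int) c =>
        if !(isEmptyCol c) then
          match st.2 with
          | none => (st.1, some c)
          | some _ => st
        else
          match st.2 with
          | none => st
          | some s => (st.1 ++ [(s, c)], none))
      ([], none)
    match st.2 with
    | none => st.1
    | some s => st.1 ++ [(s, width)]

-- ===== PORT B =====
-- the body of _merge after its recursive call: attach column c in front of the runs
def pvConsRun : Int → List (Int × Int) → List (Int × Int)
  | c, (a, b) :: t => if a = c + 1 then (c, b) :: t else (c, c + 1) :: (a, b) :: t
  | c, [] => [(c, c + 1)]

-- _merge of Source B: recursive right-to-left merge of the sorted occupied-column list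
def pvMerge : List Int → List (Int × Int)
  | [] => []
  | c :: rest => pvConsRun c (pvMerge rest)

def get_problem_column_alt (lines : List String) : List (Int × Int) :=
  let occupied : List Int :=
    PySem.List.sorted
      (PySem.Set.ofList (lines.flatMap (fun line =>
        ((PySem.List.enumerate line.toList 0).filter (fun p => !(p.2 == ' '))).map (fun p => p.1))))
      (fun x => x) false
  pvMerge occupied

-- ===== PRECONDITION & SPEC =====
-- Pre_ excludes only the empty list, on which A raises ValueError (max() of an empty sequence).
def Pre_get_problem_column (lines : List String) : Prop := lines ≠ []
instance (lines : List String) : Decidable (Pre_get_problem_column lines) := by unfold Pre_get_problem_column; infer_instance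
def pvWitness_get_problem_column : List String := [" ab  cd", "  b   d"]

def Spec_get_problem_column (lines : List String) (out : List (Int × Int)) : Prop := out = get_problem_column_alt lines
instance (lines : List String) (out : List (Int × Int)) : Decidable (Spec_get_problem_column lines out) := by unfold Spec_get_problem_column; infer_instance

-- ===== CLAIM (what is proved, stated in full; the proofs are below) =====
def Claim_equal_get_problem_column : Prop := ∀ (lines : List String), Dom_get_problem_column lines → Pre_get_problem_column lines → Spec_get_problem_column lines (get_problem_column lines)

-- ===== LEMMAS AND PROOFS =====

-- A's fold characterised: run extraction over the boolean column mask
mutual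
def pvRuns : Int → List Bool → List (Int × Int)
  | _, [] => []
  | i, false :: rest => pvRuns (i + 1) rest
  | i, true :: rest => pvRunsOpen i (i + 1) rest
-- an open run that started at column s, currently at column i
def pvRunsOpen : Int → Int → List Bool → List (Int × Int)
  | s, i, [] => [(s, i)]
  | s, i, true :: rest => pvRunsOpen s (i + 1) rest
  | s, i, false :: rest => (s, i) :: pvRuns (i + 1) rest
end

-- B's flag at column c is the negation of A's is_empty_col(c)
theorem pvFlag_eq (lines : List String) (c : Int) :
    (!(lines.all (fun line => decide (c ≥ PySem.Str.len line) || (PySem.Str.pyGet? line c == some ' '))))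
      = lines.any (fun line => decide (c < PySem.Str.len line) && !(PySem.Str.pyGet? line c == some ' ')) := by
  induction lines with
  | nil => rfl
  | cons l rest ih =>
    simp only [List.all_cons, List.any_cons, Bool.not_and, Bool.not_or, ← ih]
    congr 2
    simp only [← decide_not]
    exact decide_eq_decide.mpr (by omega)

-- the A-side step function, named so the invariant can be stated about it
def pvAStep (flag : Int → Bool) (st : List (Int × Int) × Option Int) (c : Int) :
    List (Int × Int) × Option Int :=
  if flag c then
    match st.2 with
    | none => (st.1, some c)
    | some _ => st
  else
    match st.2 with
    | none => st
    | some s => (st.1 ++ [(s, c)], none)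

def pvFinish (b : Int) (st : List (Int × Int) × Option Int) : List (Int × Int) :=
  match st.2 with
  | none => st.1
  | some s => st.1 ++ [(s, b)]

def pvPart (start : Option Int) (i : Int) (fl : List Bool) : List (Int × Int) :=
  match start with
  | none => pvRuns i fl
  | some s => pvRunsOpen s i fl

-- invariant of A's loop: the fold over [a, a+n) plus the final flush equals run extraction on the mask
theorem pvMain (flag : Int → Bool) :
    ∀ (n : Nat) (a : Int) (probs : List (Int × Int)) (start : Option Int),
    pvFinish (a + n) ((PySem.List.pyRange a (a + n) 1).foldl (pvAStep flag) (probs, start))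
      = probs ++ pvPart start a (((PySem.List.pyRange a (a + n) 1)).map flag) := by
  intro n
  induction n with
  | zero =>
    intro a probs start
    simp only [Nat.cast_zero, add_zero]
    rw [PySem.List.pyRange_one_eq_nil (by omega)]
    cases start <;> simp [pvFinish, pvPart, pvRuns, pvRunsOpen]
  | succ m ih =>
    intro a probs start
    have hcast : a + ((m + 1 : Nat) : Int) = (a + 1) + (m : Int) := by push_cast; ring
    rw [hcast, PySem.List.pyRange_one_cons (by omega)]
    simp only [List.foldl_cons, List.map_cons]
    by_cases hf : flag a = true
    · cases start with
      | none =>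
        have hstep : pvAStep flag (probs, none) a = (probs, some a) := by simp [pvAStep, hf]
        rw [hstep, ih (a + 1) probs (some a)]
        simp only [pvPart, hf, pvRuns]
      | some s =>
        have hstep : pvAStep flag (probs, some s) a = (probs, some s) := by simp [pvAStep, hf]
        rw [hstep, ih (a + 1) probs (some s)]
        simp only [pvPart, hf, pvRunsOpen]
    · rw [Bool.not_eq_true] at hf
      cases start with
      | none =>
        have hstep : pvAStep flag (probs, none) a = (probs, none) := by simp [pvAStep, hf]
        rw [hstep, ih (a + 1) probs none]
        simp only [pvPart, hf, pvRuns]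
      | some s =>
        have hstep : pvAStep flag (probs, some s) a = (probs ++ [(s, a)], none) := by simp [pvAStep, hf]
        rw [hstep, ih (a + 1) (probs ++ [(s, a)]) none]
        simp [pvPart, hf, pvRunsOpen]

-- the true columns of a mask, with their absolute indices
def pvTrueCols : Int → List Bool → List Int
  | _, [] => []
  | i, true :: rest => i :: pvTrueCols (i + 1) rest
  | i, false :: rest => pvTrueCols (i + 1) rest

theorem pvTrueCols_ge (fl : List Bool) : ∀ (i : Int) (x : Int), x ∈ pvTrueCols i fl → i ≤ x := by
  induction fl with
  | nil => intro i x h; simp [pvTrueCols] at h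
  | cons b rest ih =>
    intro i x h
    cases b with
    | false =>
      simp only [pvTrueCols] at h
      have := ih (i + 1) x h; omega
    | true =>
      simp only [pvTrueCols, List.mem_cons] at h
      rcases h with h | h
      · omega
      · have := ih (i + 1) x h; omega

theorem pvMerge_head (c : Int) (r : List Int) :
    ∃ b t, pvMerge (c :: r) = (c, b) :: t := by
  show ∃ b t, pvConsRun c (pvMerge r) = (c, b) :: t
  cases h : pvMerge r with
  | nil => exact ⟨c + 1, [], rfl⟩
  | cons p t =>
    obtain ⟨a, bb⟩ := p
    by_cases ha : a = c + 1
    · exact ⟨bb, t, by simp [pvConsRun, ha]⟩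
    · exact ⟨c + 1, (a, bb) :: t, by simp [pvConsRun, ha]⟩

-- the "open run" counterpart of pvConsRun
def pvOpen : Int → Int → List (Int × Int) → List (Int × Int)
  | s, i, (a, b) :: t => if a = i then (s, b) :: t else (s, i) :: (a, b) :: t
  | s, i, [] => [(s, i)]

theorem pvConsRun_eq_open (c : Int) (runs : List (Int × Int)) :
    pvConsRun c runs = pvOpen c (c + 1) runs := by
  cases runs with
  | nil => rfl
  | cons p t => obtain ⟨a, b⟩ := p; rfl

-- run extraction on the mask equals the right-to-left merge of the mask's true columns
theorem pvRunsMerge (fl : List Bool) :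
    (∀ i, pvRuns i fl = pvMerge (pvTrueCols i fl)) ∧
    (∀ s i, pvRunsOpen s i fl = pvOpen s i (pvMerge (pvTrueCols i fl))) := by
  induction fl with
  | nil => exact ⟨fun i => rfl, fun s i => rfl⟩
  | cons b rest ih =>
    obtain ⟨iha, ihb⟩ := ih
    cases b with
    | false =>
      constructor
      · intro i
        show pvRuns (i + 1) rest = pvMerge (pvTrueCols i (false :: rest))
        simp only [pvTrueCols]
        exact iha (i + 1)
      · intro s i
        show (s, i) :: pvRuns (i + 1) rest = pvOpen s i (pvMerge (pvTrueCols i (false :: rest)))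
        simp only [pvTrueCols]
        rw [iha (i + 1)]
        cases hX : pvTrueCols (i + 1) rest with
        | nil => rfl
        | cons c r =>
          have hc : i + 1 ≤ c := pvTrueCols_ge rest (i + 1) c (by rw [hX]; exact List.mem_cons_self)
          obtain ⟨bb, t, hbt⟩ := pvMerge_head c r
          rw [hbt, pvOpen]
          simp [show ¬ (c = i) by omega]
    | true =>
      constructor
      · intro i
        show pvRunsOpen i (i + 1) rest = pvMerge (pvTrueCols i (true :: rest))
        simp only [pvTrueCols]
        rw [ihb i (i + 1)]
        show _ = pvConsRun i (pvMerge (pvTrueCols (i + 1) rest))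
        rw [pvConsRun_eq_open]
      · intro s i
        show pvRunsOpen s (i + 1) rest = pvOpen s i (pvMerge (pvTrueCols i (true :: rest)))
        simp only [pvTrueCols]
        rw [ihb s (i + 1)]
        show _ = pvOpen s i (pvConsRun i (pvMerge (pvTrueCols (i + 1) rest)))
        rw [pvConsRun_eq_open]
        cases hM : pvMerge (pvTrueCols (i + 1) rest) with
        | nil => simp [pvOpen]
        | cons p t =>
          obtain ⟨a, bb⟩ := p
          by_cases ha : a = i + 1
          · simp [pvOpen, ha]
          · simp [pvOpen, ha]

-- the true columns of the mask of [a, a+n) are the flagged columns of the range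
theorem pvTrueCols_map_range (flag : Int → Bool) :
    ∀ (n : Nat) (a : Int),
      pvTrueCols a ((PySem.List.pyRange a (a + n) 1).map flag)
        = (PySem.List.pyRange a (a + n) 1).filter flag := by
  intro n
  induction n with
  | zero =>
    intro a
    simp only [Nat.cast_zero, add_zero]
    rw [PySem.List.pyRange_one_eq_nil (by omega)]
    rfl
  | succ m ih =>
    intro a
    have hcast : a + ((m + 1 : Nat) : Int) = (a + 1) + (m : Int) := by push_cast; ring
    rw [hcast, PySem.List.pyRange_one_cons (by omega)]
    simp only [List.map_cons, List.filter_cons]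
    cases hf : flag a with
    | true => simp [pvTrueCols, ih (a + 1)]
    | false => simp [pvTrueCols, ih (a + 1)]

-- the occupied-column list of B holds exactly the flagged columns
theorem pvOcc_mem (lines : List String) (c : Int) :
    (c ∈ lines.flatMap (fun line =>
        ((PySem.List.enumerate line.toList 0).filter (fun p => !(p.2 == ' '))).map (fun p => p.1)))
      ↔ (0 ≤ c ∧ ∃ line ∈ lines, c < PySem.Str.len line ∧ ¬ (PySem.Str.pyGet? line c = some ' ')) := by
  simp only [List.mem_flatMap, List.mem_map, List.mem_filter,
    PySem.List.mem_enumerate_iff]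
  constructor
  · rintro ⟨line, hline, ⟨p, ⟨⟨k, hk, hp⟩, hne⟩, hc⟩⟩
    subst hp
    simp only at hne hc
    subst hc
    have h0 : (0 : Int) + (k : Int) = (k : Int) := by omega
    refine ⟨by omega, line, hline, ?_, ?_⟩
    · rw [PySem.Str.len_eq]; omega
    · rw [h0, PySem.Str.pyGet?_natCast]
      simp only [List.getElem?_eq_getElem hk, Option.some.injEq]
      intro hsp
      rw [hsp] at hne; simp at hne
  · rintro ⟨h0, line, hline, hlt, hne⟩
    have hk : c.toNat < line.toList.length := by
      rw [PySem.Str.len_eq] at hlt; omega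
    refine ⟨line, hline, ⟨(0 + (c.toNat : Int), line.toList[c.toNat]), ⟨⟨c.toNat, hk, rfl⟩, ?_⟩, by omega⟩⟩
    simp only [Bool.not_eq_eq_eq_not, Bool.not_true, beq_eq_false_iff_ne, ne_eq]
    intro hsp
    apply hne
    have hc : c = ((c.toNat : Nat) : Int) := by omega
    rw [hc, PySem.Str.pyGet?_natCast, List.getElem?_eq_getElem hk, hsp]

-- B's sorted occupied list is the flagged columns of [0, width), in order
theorem pvOcc_sorted (lines : List String) (width : Int)
    (hw : PySem.List.max? (lines.map (fun line => PySem.Str.len line)) (fun x => x) = some width) :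
    PySem.List.sorted
      (PySem.Set.ofList (lines.flatMap (fun line =>
        ((PySem.List.enumerate line.toList 0).filter (fun p => !(p.2 == ' '))).map (fun p => p.1))))
      (fun x => x) false
    = (PySem.List.pyRange 0 width 1).filter
        (fun c => lines.any (fun line => decide (c < PySem.Str.len line) && !(PySem.Str.pyGet? line c == some ' '))) := by
  apply PySem.List.sorted_eq_of_perm_of_pairwise_lt
  · rw [List.perm_ext_iff_of_nodup
      (List.Nodup.filter _ (PySem.List.nodup_pyRange_one 0 width))
      (PySem.Set.nodup_ofList _)]
    intro c
    rw [PySem.Set.mem_ofList, pvOcc_mem, List.mem_filter, PySem.List.mem_pyRange_one]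
    have hmax : ∀ line ∈ lines, PySem.Str.len line ≤ width := by
      intro line hline
      have : PySem.Str.len line ∈ lines.map (fun line => PySem.Str.len line) :=
        List.mem_map.mpr ⟨line, hline, rfl⟩
      exact PySem.List.max?_isMax hw _ this
    simp only [List.any_eq_true, Bool.and_eq_true, decide_eq_true_eq,
      Bool.not_eq_eq_eq_not, Bool.not_true, beq_eq_false_iff_ne, ne_eq]
    constructor
    · rintro ⟨⟨h0, hcw⟩, line, hline, hlt, hne⟩
      exact ⟨h0, line, hline, hlt, hne⟩
    · rintro ⟨h0, line, hline, hlt, hne⟩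
      exact ⟨⟨h0, lt_of_lt_of_le hlt (hmax line hline)⟩, line, hline, hlt, hne⟩
  · exact List.Pairwise.filter _ (PySem.List.pairwise_lt_pyRange_one 0 width)

-- ===== VERDICT (by name: the statements are the Claim_ definitions above) =====
theorem get_problem_column_spec : Claim_equal_get_problem_column := by
  intro lines _ hpre
  unfold Spec_get_problem_column get_problem_column get_problem_column_alt
  cases hw : PySem.List.max? (lines.map (fun line => PySem.Str.len line)) (fun x => x) with
  | none =>
    exact absurd (by simpa using (PySem.List.max?_eq_none_iff _ _).mp hw) hpre
  | some width =>
    have hwnn : 0 ≤ width := by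
      have hm := PySem.List.max?_mem hw
      obtain ⟨l, _, hl⟩ := List.mem_map.mp hm
      rw [← hl, PySem.Str.len_eq]; positivity
    simp only []
    set flag : Int → Bool := fun c =>
      lines.any (fun line => decide (c < PySem.Str.len line) && !(PySem.Str.pyGet? line c == some ' ')) with hflag
    have hkey := pvMain flag width.toNat 0 [] none
    have hcast : (0 : Int) + (width.toNat : Int) = width := by omega
    rw [hcast] at hkey
    have hstep : (fun (st : List (Int × Int) × Option Int) c =>
        if !(lines.all (fun line => decide (c ≥ PySem.Str.len line) || (PySem.Str.pyGet? line c == some ' '))) then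
          match st.2 with
          | none => (st.1, some c)
          | some _ => st
        else
          match st.2 with
          | none => st
          | some s => (st.1 ++ [(s, c)], none))
      = pvAStep flag := by
      funext st c
      rw [pvFlag_eq]
      rfl
    rw [hstep]
    have hfin : (match ((PySem.List.pyRange 0 width 1).foldl (pvAStep flag) ([], none)).2 with
      | none => ((PySem.List.pyRange 0 width 1).foldl (pvAStep flag) ([], none)).1
      | some s => ((PySem.List.pyRange 0 width 1).foldl (pvAStep flag) ([], none)).1 ++ [(s, width)])
      = pvFinish width ((PySem.List.pyRange 0 width 1).foldl (pvAStep flag) ([], none)) := rfl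
    rw [hfin, hkey]
    simp only [pvPart, List.nil_append]
    rw [pvOcc_sorted lines width hw, ← hflag, ← hcast,
        ← pvTrueCols_map_range flag width.toNat 0]
    exact (pvRunsMerge _).1 0
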